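-- pv_equiv track=rewrite | github.com/half-pie/half-json | half_json/_helpers.py | build_bracket_stack
-- ===== SOURCE A (Python) =====
-- def build_bracket_stack(text: str, end: int | None = None) -> tuple[str, ...]:
--     """Return unmatched opening brackets up to position `end`."""
--     if end is None:
--         end = len(text)
--     stack: list[str] = []
--     in_string = False
--     escape = False
--     for i in range(min(end, len(text))):
--         ch = text[i]
--         if escape:
--             escape = False
--             continue
--         if ch == '\\' and in_string:
--             escape = True
--             continue
--         if ch == '"':
--             in_string = not in_string
--             continue
--         if in_string:
--             continue
--         if ch in ('{', '['):
--             stack.append(ch)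
--         elif ch == '}' and stack and stack[-1] == '{':
--             stack.pop()
--         elif ch == ']' and stack and stack[-1] == '[':
--             stack.pop()
--     return tuple(stack)
-- ===== SOURCE B (Python) =====
-- def _strip_strings(s):
--     """Remove JSON string literals (with A's escape rule: backslash skips one
--     char, only inside strings); an unterminated trailing string is dropped."""
--     out = []
--     i = 0
--     n = len(s)
--     while i < n:
--         c = s[i]
--         if c == '"':
--             i += 1
--             while i < n:
--                 if s[i] == '\\':
--                     i += 2
--                 elif s[i] == '"':
--                     i += 1
--                     break
--                 else:
--                     i += 1
--         else:
--             out.append(c)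
--             i += 1
--     return out
--
--
-- def build_bracket_stack(text: str, end: int | None = None) -> tuple[str, ...]:
--     if end is None:
--         end = len(text)
--     s = text[:max(0, min(end, len(text)))]
--     stack: list[str] = []
--     for c in _strip_strings(s):
--         if c in '{[':
--             stack.append(c)
--         elif c == '}' and stack and stack[-1] == '{':
--             stack.pop()
--         elif c == ']' and stack and stack[-1] == '[':
--             stack.pop()
--     return tuple(stack)
-- ===== Notes on version B (the rewrite author's own statement) =====
-- stated objective: alternative
-- what changed: A's single interleaved loop carrying stack/in_string/escape state is split into two passes: a lexer that strips JSON string literals (handling escapes and an unterminated trailing string), followed by a plain matching-bracket stack over the remaining structural characters.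
import Mathlib
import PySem

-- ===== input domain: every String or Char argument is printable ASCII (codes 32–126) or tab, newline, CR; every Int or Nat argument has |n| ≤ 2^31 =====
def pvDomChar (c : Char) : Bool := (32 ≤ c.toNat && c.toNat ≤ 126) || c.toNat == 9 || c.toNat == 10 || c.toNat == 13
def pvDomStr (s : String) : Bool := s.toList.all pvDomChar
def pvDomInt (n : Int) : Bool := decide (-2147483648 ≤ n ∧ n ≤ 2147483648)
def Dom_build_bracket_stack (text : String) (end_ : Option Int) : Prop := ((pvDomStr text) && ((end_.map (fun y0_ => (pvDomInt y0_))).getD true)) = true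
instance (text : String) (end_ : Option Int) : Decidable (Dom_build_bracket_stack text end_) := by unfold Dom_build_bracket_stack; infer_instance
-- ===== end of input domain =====

-- B separates A's single interleaved loop into two passes (strip string literals, then a
-- plain bracket stack); same cost, objective: alternative decomposition.
-- In both ports the Python list used as a stack (append/pop at the END, stack[-1] = top) is
-- represented head-as-top (cons/tail/head?), with a final reverse producing the
-- bottom-to-top tuple order Python returns; same values, step for step.

-- ===== PORT A =====
-- one step of A's loop body; state = (stack, in_string, escape)
def stepA (st : List String × Bool × Bool) (ch : Char) : List String × Bool × Bool :=
  match st with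
  | (stack, in_string, escape) =>
    if escape then (stack, in_string, false)
    else if ch = '\\' ∧ in_string then (stack, in_string, true)
    else if ch = '"' then (stack, !in_string, false)
    else if in_string then (stack, in_string, false)
    else if ch = '{' ∨ ch = '[' then (ch.toString :: stack, in_string, false)
    else if ch = '}' ∧ stack.head? = some "{" then (stack.tail, in_string, false)
    else if ch = ']' ∧ stack.head? = some "[" then (stack.tail, in_string, false)
    else (stack, in_string, false)

def build_bracket_stack (text : String) (end_ : Option Int) : List String :=
  let e : Int := match end_ with | none => (text.length : Int) | some e => e
  -- `for i in range(min(end, len(text))): ch = text[i]` walks exactly the first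
  -- (min e len).toNat characters (empty when the bound is negative, as range() is)
  let cs := text.toList.take (min e (text.length : Int)).toNat
  (cs.foldl stepA ([], false, false)).1.reverse

-- ===== PORT B =====
-- inner while-loop of _strip_strings: skip a string literal (backslash skips one char)
def skipStr : List Char → List Char
  | [] => []
  | c :: rest =>
    if c = '\\' then skipStr rest.tail
    else if c = '"' then rest
    else skipStr rest
termination_by cs => cs.length
decreasing_by
  all_goals simp only [List.length_tail, List.length_cons]; omega

theorem skipStr_length_le : ∀ cs : List Char, (skipStr cs).length ≤ cs.length := by
  intro cs
  induction cs using skipStr.induct with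
  | case1 => simp [skipStr]
  | case2 rest ih =>
    rw [show skipStr ('\\' :: rest) = skipStr rest.tail from by simp [skipStr]]
    have := List.length_tail (l := rest)
    simp only [List.length_cons]
    omega
  | case3 rest h =>
    rw [show skipStr ('"' :: rest) = rest from by simp [skipStr]]
    simp
  | case4 c rest h h' ih =>
    rw [show skipStr (c :: rest) = skipStr rest from by simp [skipStr, h, h']]
    exact le_trans ih (Nat.le_succ _)

-- outer loop of _strip_strings
def stripStrings : List Char → List Char
  | [] => []
  | c :: rest =>
    if c = '"' then stripStrings (skipStr rest)
    else c :: stripStrings rest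
termination_by cs => cs.length
decreasing_by
  · exact Nat.lt_succ_of_le (skipStr_length_le rest)
  · simp

-- one step of B's bracket loop
def stepB (stack : List String) (c : Char) : List String :=
  if c = '{' ∨ c = '[' then c.toString :: stack
  else if c = '}' ∧ stack.head? = some "{" then stack.tail
  else if c = ']' ∧ stack.head? = some "[" then stack.tail
  else stack

def build_bracket_stack_alt (text : String) (end_ : Option Int) : List String :=
  let e : Int := match end_ with | none => (text.length : Int) | some e => e
  -- text[:max(0, min(end, len(text)))] with a nonnegative bound is exactly `take`
  let s := text.toList.take (max 0 (min e (text.length : Int))).toNat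
  ((stripStrings s).foldl stepB []).reverse

-- ===== PRECONDITION & SPEC =====
def Spec_build_bracket_stack (text : String) (end_ : Option Int) (out : List String) : Prop := out = build_bracket_stack_alt text end_
instance (text : String) (end_ : Option Int) (out : List String) : Decidable (Spec_build_bracket_stack text end_ out) := by unfold Spec_build_bracket_stack; infer_instance

-- ===== CLAIM (what is proved, stated in full; the proofs are below) =====
def Claim_equal_build_bracket_stack : Prop := ∀ (text : String) (end_ : Option Int), Dom_build_bracket_stack text end_ → Spec_build_bracket_stack text end_ (build_bracket_stack text end_)

-- ===== LEMMAS AND PROOFS =====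

-- outside a string, on a non-quote char, A's step is B's step (copying the rest of its state)
theorem stepA_normal (stack : List String) (c : Char) (h : c ≠ '"') :
    stepA (stack, false, false) c = (stepB stack c, false, false) := by
  simp only [stepA, stepB]
  split_ifs with h1 h2 h3 h4 h5 h6 <;> simp_all

-- the three A-states versus B's two passes, by strong induction on a length bound
theorem foldA_strip : ∀ n : Nat, ∀ cs : List Char, cs.length ≤ n → ∀ stack : List String,
    ((cs.foldl stepA (stack, false, false)).1 = (stripStrings cs).foldl stepB stack)
    ∧ ((cs.foldl stepA (stack, true, false)).1 = (stripStrings (skipStr cs)).foldl stepB stack)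
    ∧ ((cs.foldl stepA (stack, true, true)).1 = (stripStrings (skipStr cs.tail)).foldl stepB stack) := by
  intro n
  induction n with
  | zero =>
    intro cs hcs stack
    have : cs = [] := List.eq_nil_of_length_eq_zero (Nat.le_zero.mp hcs)
    subst this
    simp [stripStrings, skipStr]
  | succ n ih =>
    intro cs hcs stack
    match cs with
    | [] => simp [stripStrings, skipStr]
    | c :: rest =>
      have hr : rest.length ≤ n := Nat.le_of_succ_le_succ hcs
      have hrt : rest.tail.length ≤ n :=
        le_trans (by have := List.length_tail (l := rest); omega : rest.tail.length ≤ rest.length) hr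
      have hsk : (skipStr rest).length ≤ n := le_trans (skipStr_length_le rest) hr
      refine ⟨?_, ?_, ?_⟩
      · -- normal mode
        by_cases hq : c = '"'
        · subst hq
          have hA : stepA (stack, false, false) '"' = (stack, true, false) := by
            simp [stepA]
          simp only [List.foldl_cons, hA, stripStrings]
          exact (ih rest hr stack).2.1
        · have hA : stepA (stack, false, false) c = (stepB stack c, false, false) :=
            stepA_normal stack c hq
          simp only [List.foldl_cons, hA, stripStrings, if_neg hq]
          exact (ih rest hr (stepB stack c)).1
      · -- in-string mode
        by_cases hb : c = '\\'
        · subst hb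
          have hA : stepA (stack, true, false) '\\' = (stack, true, true) := by
            simp [stepA]
          rw [show skipStr ('\\' :: rest) = skipStr rest.tail from by simp [skipStr]]
          simp only [List.foldl_cons, hA]
          exact ((ih rest hr stack).2.2)
        · by_cases hq : c = '"'
          · subst hq
            have hA : stepA (stack, true, false) '"' = (stack, false, false) := by
              simp [stepA]
            rw [show skipStr ('"' :: rest) = rest from by simp [skipStr]]
            simp only [List.foldl_cons, hA]
            exact (ih rest hr stack).1
          · have hA : stepA (stack, true, false) c = (stack, true, false) := by
              simp [stepA, hb, hq]
            rw [show skipStr (c :: rest) = skipStr rest from by simp [skipStr, hb, hq]]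
            simp only [List.foldl_cons, hA]
            exact (ih rest hr stack).2.1
      · -- escaped mode: current char is consumed unconditionally
        have hA : stepA (stack, true, true) c = (stack, true, false) := by
          simp [stepA]
        simp only [List.foldl_cons, hA, List.tail_cons]
        exact (ih rest hr stack).2.1

-- the two clamped prefix bounds coincide
theorem toNat_max_zero (x : Int) : (max 0 x).toNat = x.toNat := by omega

-- ===== VERDICT (by name: the statement is the Claim_ definition above) =====
theorem build_bracket_stack_spec : Claim_equal_build_bracket_stack := by
  intro text end_ _
  unfold Spec_build_bracket_stack build_bracket_stack build_bracket_stack_alt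
  dsimp only
  rw [toNat_max_zero]
  exact congrArg List.reverse ((foldA_strip _ _ le_rfl []).1)
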